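-- pv_equiv track=rewrite | github.com/ASSERT-KTH/DET-Gen | experiments/pynguin/c4b/return-lst/generated_tests/src_1131/6/src_1131.py | func
-- ===== SOURCE A (Python) =====
-- def func(*args):
-- 	ret_values = []
--
-- 	s1 = args[0]
-- 	s2 = args[1]
-- 	s3 = args[2]
-- 	s4 = args[3]
-- 	i = 0
-- 	f = False
-- 	while ((i < 3) and (f == False)):
-- 	    if (((s1[i] == s2[i]) and (s1[(i + 1)] == s2[(i + 1)] == s1[i])) or ((s1[i] == s2[i]) and (s1[(i + 1)] != s2[(i + 1)])) or ((s1[i] != s2[i]) and (s1[(i + 1)] == s2[(i + 1)]))):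
-- 	        f = True
-- 	    i += 1
-- 	i = 0
-- 	while ((i < 3) and (f == False)):
-- 	    if (((s2[i] == s3[i]) and (s2[(i + 1)] == s3[(i + 1)] == s2[i])) or ((s2[i] == s3[i]) and (s2[(i + 1)] != s3[(i + 1)])) or ((s2[i] != s3[i]) and (s2[(i + 1)] == s3[(i + 1)]))):
-- 	        f = True
-- 	    i += 1
-- 	i = 0
-- 	while ((i < 3) and (f == False)):
-- 	    if (((s3[i] == s4[i]) and (s3[(i + 1)] == s4[(i + 1)] == s3[i])) or ((s3[i] == s4[i]) and (s3[(i + 1)] != s4[(i + 1)])) or ((s3[i] != s4[i]) and (s3[(i + 1)] == s4[(i + 1)]))):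
-- 	        f = True
-- 	    i += 1
-- 	if f:
-- 	    ret_values.append('YES')
-- 	else:
-- 	    ret_values.append('NO')
--
-- 	return ret_values
-- ===== SOURCE B (Python) =====
-- def func(*args):
--     s1, s2, s3, s4 = args[0], args[1], args[2], args[3]
--
--     def near(a, b):
--         # one forward pass comparing each position once, carrying the previous
--         # position's match bit: the pair is 'near' at i>0 iff the match bit
--         # flips, or it stays matched across a repeated character of a
--         def go(i, prev):
--             if i == 4:
--                 return False
--             e = a[i] == b[i]
--             if i > 0 and (e != prev or (prev and e and a[i - 1] == a[i])):
--                 return True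
--             return go(i + 1, e)
--         return go(0, False)
--
--     return ['YES' if near(s1, s2) or near(s2, s3) or near(s3, s4) else 'NO']
-- ===== Notes on version B (the rewrite author's own statement) =====
-- stated objective: alternative
-- what changed: Replaces the three hand-unrolled flag-driven while-loops, whose window predicate re-reads every interior position twice, by a single forward recursion per pair that compares each position once and carries the previous position's match bit (fires on a flip of the bit, or on a match kept across a repeated character); the pairs are chained with short-circuit or instead of the threaded flag.
import Mathlib
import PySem

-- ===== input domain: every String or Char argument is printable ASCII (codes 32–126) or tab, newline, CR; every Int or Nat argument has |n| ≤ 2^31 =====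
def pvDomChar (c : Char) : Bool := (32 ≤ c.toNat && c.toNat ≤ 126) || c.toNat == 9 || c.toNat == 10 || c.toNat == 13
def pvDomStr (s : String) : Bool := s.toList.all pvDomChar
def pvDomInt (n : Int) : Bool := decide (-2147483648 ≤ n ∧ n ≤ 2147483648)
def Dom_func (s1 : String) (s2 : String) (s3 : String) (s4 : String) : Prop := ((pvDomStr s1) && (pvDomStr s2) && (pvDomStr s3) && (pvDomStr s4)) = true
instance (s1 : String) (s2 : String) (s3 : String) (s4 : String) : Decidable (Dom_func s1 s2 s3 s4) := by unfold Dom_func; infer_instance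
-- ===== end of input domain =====

-- B replaces A's three flag-driven window-scanning while-loops by an equality-mask
-- classification of each adjacent pair (mixed mask, or all-matching with a repeated
-- adjacent character); objective: alternative algorithm of the same cost.

-- ===== PORT A =====
-- A's window condition at index i of the pair (a, b); indices are in range under Pre_func.
def aCond (a b : List Char) (i : Nat) : Bool :=
  let x  := a.getD i ' '
  let y  := b.getD i ' '
  let x1 := a.getD (i + 1) ' '
  let y1 := b.getD (i + 1) ' '
  (x == y && (x1 == y1 && y1 == x)) || (x == y && !(x1 == y1)) || (!(x == y) && (x1 == y1))

-- one of A's 'while i < 3 and f == False' loops (fuel = 3 - i)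
def aWhile (a b : List Char) : Nat → Nat → Bool → Bool
  | 0, _, f => f
  | fuel + 1, i, f =>
    if i < 3 && f == false then
      aWhile a b fuel (i + 1) (if aCond a b i then true else f)
    else f

def func (s1 : String) (s2 : String) (s3 : String) (s4 : String) : List String :=
  let f := aWhile s1.toList s2.toList 3 0 false
  let f := aWhile s2.toList s3.toList 3 0 f
  let f := aWhile s3.toList s4.toList 3 0 f
  if f then ["YES"] else ["NO"]

-- ===== PORT B =====
-- B's pair pass: one forward recursion comparing each position once, carrying the
-- previous position's match bit (fuel = 4 - i, as in Source B's go)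
def bGo (a b : List Char) : Nat → Nat → Bool → Bool
  | 0, _, _ => false
  | fuel + 1, i, prev =>
    if i == 4 then false
    else
      let e := a.getD i ' ' == b.getD i ' '
      if decide (0 < i) && ((e != prev) || (prev && e && (a.getD (i - 1) ' ' == a.getD i ' '))) then
        true
      else
        bGo a b fuel (i + 1) e

def bNear (a b : List Char) : Bool := bGo a b 4 0 false

def func_alt (s1 : String) (s2 : String) (s3 : String) (s4 : String) : List String :=
  if bNear s1.toList s2.toList || bNear s2.toList s3.toList || bNear s3.toList s4.toList then
    ["YES"]
  else
    ["NO"]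

-- ===== PRECONDITION & SPEC =====
-- Pre_func excludes exactly the inputs where both Pythons raise IndexError: a pair is
-- scanned only while no earlier pair has fired, a window j reads indices j and j+1 of
-- both strings, and scanning stops at the first firing window.
-- pvPCond a b j: the window condition at j (the equality pattern flips, or three chars equal).
def pvPCond (a b : List Char) (j : Nat) : Prop :=
  (¬((a.getD j ' ' = b.getD j ' ') ↔ (a.getD (j + 1) ' ' = b.getD (j + 1) ' '))) ∨
  (a.getD j ' ' = b.getD j ' ' ∧ a.getD j ' ' = a.getD (j + 1) ' ' ∧
    a.getD (j + 1) ' ' = b.getD (j + 1) ' ')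
-- some window triggers with both its indices in range
def pvFires (a b : List Char) : Prop := ∃ j < 3, j + 1 < min a.length b.length ∧ pvPCond a b j
-- scanning this pair does not raise: long enough, or a trigger stops the scan in range
def pvPairSafe (a b : List Char) : Prop := 4 ≤ min a.length b.length ∨ pvFires a b
def Pre_func (s1 : String) (s2 : String) (s3 : String) (s4 : String) : Prop :=
  pvPairSafe s1.toList s2.toList ∧
    (pvFires s1.toList s2.toList ∨
      (pvPairSafe s2.toList s3.toList ∧
        (pvFires s2.toList s3.toList ∨ pvPairSafe s3.toList s4.toList)))
instance (s1 : String) (s2 : String) (s3 : String) (s4 : String) : Decidable (Pre_func s1 s2 s3 s4) := by unfold Pre_func pvPairSafe pvFires pvPCond; infer_instance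
def pvWitness_func : String × String × String × String := ("abcd", "abce", "wxyz", "wxyz")

def Spec_func (s1 : String) (s2 : String) (s3 : String) (s4 : String) (out : List String) : Prop := out = func_alt s1 s2 s3 s4
instance (s1 : String) (s2 : String) (s3 : String) (s4 : String) (out : List String) : Decidable (Spec_func s1 s2 s3 s4 out) := by unfold Spec_func; infer_instance

-- ===== CLAIM (what is proved, stated in full; the proofs are below) =====
def Claim_equal_func : Prop := ∀ (s1 : String) (s2 : String) (s3 : String) (s4 : String), Dom_func s1 s2 s3 s4 → Pre_func s1 s2 s3 s4 → Spec_func s1 s2 s3 s4 (func s1 s2 s3 s4)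

-- ===== LEMMAS AND PROOFS =====

-- one flag-driven while-loop equals the disjunction of the three window conditions
theorem aWhile_eq (a b : List Char) :
    aWhile a b 3 0 false = (aCond a b 0 || aCond a b 1 || aCond a b 2) := by
  cases h0 : aCond a b 0 <;> cases h1 : aCond a b 1 <;> cases h2 : aCond a b 2 <;>
    simp [aWhile, h0, h1, h2]

theorem aWhile_true (a b : List Char) : aWhile a b 3 0 true = true := by
  simp [aWhile]

theorem aWhile_or (a b : List Char) (f : Bool) :
    aWhile a b 3 0 f = (f || aWhile a b 3 0 false) := by
  cases f
  · simp
  · simp [aWhile_true]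

-- A's window-scan as a plain disjunction
def aFires (a b : List Char) : Bool := aCond a b 0 || aCond a b 1 || aCond a b 2

theorem flag_chain (l1 l2 l3 l4 : List Char) :
    aWhile l3 l4 3 0 (aWhile l2 l3 3 0 (aWhile l1 l2 3 0 false))
      = (aFires l1 l2 || (aFires l2 l3 || aFires l3 l4)) := by
  rw [aWhile_or l3 l4, aWhile_or l2 l3]
  simp [aWhile_eq, aFires, Bool.or_assoc]

-- the XOR-simplified form of A's window condition, used only by the proofs
def bCond (a b : List Char) (i : Nat) : Bool :=
  let x  := a.getD i ' '
  let y  := b.getD i ' '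
  let x1 := a.getD (i + 1) ' '
  let y1 := b.getD (i + 1) ' '
  ((x == y) != (x1 == y1)) || (x == y && (x == x1 && x1 == y1))

theorem cond_eq (a b : List Char) (i : Nat) : aCond a b i = bCond a b i := by
  simp only [aCond, bCond]
  generalize a.getD i ' ' = x
  generalize b.getD i ' ' = y
  generalize a.getD (i + 1) ' ' = x1
  generalize b.getD (i + 1) ' ' = y1
  by_cases hq : x1 = y1
  · subst hq
    cases hxy : x == y <;> simp [hxy, eq_comm, Bool.or_comm]
  · have hq' : (x1 == y1) = false := beq_eq_false_iff_ne.mpr hq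
    cases hxy : x == y <;> simp [hxy, hq']

-- A's three-window scan and B's single carried-bit pass agree on every pair of lists
theorem fires_eq (a b : List Char) : aFires a b = bNear a b := by
  simp only [aFires, cond_eq, bCond, bNear, bGo, Nat.reduceAdd, Nat.reduceSub]
  generalize (a.getD 0 ' ' == b.getD 0 ' ') = e0
  generalize (a.getD 1 ' ' == b.getD 1 ' ') = e1
  generalize (a.getD 2 ' ' == b.getD 2 ' ') = e2
  generalize (a.getD 3 ' ' == b.getD 3 ' ') = e3
  generalize (a.getD 0 ' ' == a.getD 1 ' ') = c0
  generalize (a.getD 1 ' ' == a.getD 2 ' ') = c1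
  generalize (a.getD 2 ' ' == a.getD 3 ' ') = c2
  generalize (a.getD 0 ' ' == a.getD 0 ' ') = cz
  revert e0 e1 e2 e3 c0 c1 c2 cz
  decide

-- ===== VERDICT (by name: the statement is the Claim_ definition above) =====
theorem func_spec : Claim_equal_func := by
  intro s1 s2 s3 s4 _ _
  unfold Spec_func func func_alt
  simp only [flag_chain, fires_eq, Bool.or_assoc]
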